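/-
  THE RUNTIME RECORD OF THE IMAGE: the base's entry points (the same in every program: ProgX/Base/Symbols.lean), the program's one
  constructor `_sub_I_65535_1`, and the descriptor table of its registered globals (Toyh/Globals.lean).
  The contracts that cite it: `Asan.registerGlobalsSpec rt` (__asan_register_globals), `Asan.ctorSpec rt` (_sub_I_65535_1),
  `Asan.runCtorsSpec rt` (run_ctors). The first and the last are functions of the BASE whose contracts cite the PROGRAM's table:
  `__asan_register_globals` is proved in the base for every table (`ProgX.Base.Spec.Proved.asan_register_globals_generic_ok`: no unit),
  `run_ctors` is a unit of the program (as is the stub `_start`, by the generic `ProgX.Base.Top.stub_reaches`).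
-/
import ProgX.Base.Spec.Runtime
import Toyh.Labels
import Toyh.Symbols
import Toyh.Globals
namespace Toyh.Spec
open X86 X86.User Asan

/-- **The runtime of this image.** -/
def rt : Runtime := Toyh.Globals.runtime Toyh.symbols.rt

/-- The record is the base's, with the program's constructor and table (so that a statement may cite either form). -/
theorem rt_eq : rt = ProgX.Base.Spec.runtime Toyh.L._sub_I_65535_1.entry Toyh.Globals.table Toyh.Globals.descs := rfl

end Toyh.Spec
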